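-- pv_equiv track=rewrite | github.com/ghanad/ipocket | app/routes/api.py | _expand_csv_query_values
-- ===== SOURCE A (Python) =====
-- from typing import Literal, Optional
--
-- def _expand_csv_query_values(values: Optional[list[str]]) -> list[str]:
--     if not values:
--         return []
--     expanded: list[str] = []
--     for value in values:
--         for part in value.split(","):
--             clean = part.strip()
--             if clean:
--                 expanded.append(clean)
--     return expanded
-- ===== SOURCE B (Python) =====
-- from typing import Optional
--
--
-- def _expand_csv_query_values(values: Optional[list[str]]) -> list[str]:
--     if not values:
--         return []
--     out: list[str] = []
--     for value in values:
--         cur: list[str] = []   # current token, no leading/trailing whitespace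
--         pend: list[str] = []  # whitespace seen since the last token char
--         for ch in value:
--             if ch == ",":
--                 if cur:
--                     out.append("".join(cur))
--                 cur = []
--                 pend = []
--             elif ch.isspace():
--                 if cur:
--                     pend.append(ch)
--             else:
--                 cur.extend(pend)
--                 cur.append(ch)
--                 pend = []
--         if cur:
--             out.append("".join(cur))
--     return out
-- ===== Notes on version B (the rewrite author's own statement) =====
-- stated objective: alternative
-- what changed: Replaces split-then-strip-then-filter with a single-pass character state machine that builds each token directly (tracking the current token and pending internal whitespace, flushing on commas), so no split or strip is ever performed.
import Mathlib
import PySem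

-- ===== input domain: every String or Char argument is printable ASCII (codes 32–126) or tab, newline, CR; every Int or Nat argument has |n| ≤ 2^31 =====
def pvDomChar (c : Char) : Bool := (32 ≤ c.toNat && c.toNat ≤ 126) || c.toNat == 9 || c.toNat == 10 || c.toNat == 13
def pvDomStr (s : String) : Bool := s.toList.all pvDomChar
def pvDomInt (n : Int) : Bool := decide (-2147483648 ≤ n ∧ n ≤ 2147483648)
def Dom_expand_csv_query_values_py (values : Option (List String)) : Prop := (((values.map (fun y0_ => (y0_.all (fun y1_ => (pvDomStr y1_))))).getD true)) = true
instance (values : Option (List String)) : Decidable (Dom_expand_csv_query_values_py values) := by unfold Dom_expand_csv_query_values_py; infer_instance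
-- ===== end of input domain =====

-- B replaces A's split/strip/filter pipeline by a one-pass character state machine (alternative decomposition, same cost).


-- ===== PORT A =====
-- value.split(",") with the non-empty literal separator ",": Str.split? is some here, getD [] is exact
def expand_csv_query_values_py (values : Option (List String)) : List String :=
  match values with
  | none => []
  | some vs =>
    if vs = [] then []
    else
      vs.foldl (fun expanded value =>
        ((PySem.Str.split? value ",").getD []).foldl (fun expanded part =>
          let clean := PySem.Str.strip part
          if clean ≠ "" then expanded ++ [clean] else expanded) expanded) []

-- ===== PORT B =====
-- Source B's inner character step: state = (out, cur, pend); ','.isspace() is false, so the branch order is exact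
def pvBStep (st : List String × List Char × List Char) (ch : Char) :
    List String × List Char × List Char :=
  match st with
  | (out, cur, pend) =>
    if ch = ',' then
      (if cur ≠ [] then out ++ [String.ofList cur] else out, [], [])
    else if PySem.Chars.isspace ch then
      (out, cur, if cur ≠ [] then pend ++ [ch] else pend)
    else
      (out, cur ++ pend ++ [ch], [])

def expand_csv_query_values_py_alt (values : Option (List String)) : List String :=
  match values with
  | none => []
  | some vs =>
    if vs = [] then []
    else
      vs.foldl (fun out value =>
        let st := value.toList.foldl pvBStep (out, [], [])
        if st.2.1 ≠ [] then st.1 ++ [String.ofList st.2.1] else st.1) []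

-- ===== PRECONDITION & SPEC =====
def Spec_expand_csv_query_values_py (values : Option (List String)) (out : List String) : Prop := out = expand_csv_query_values_py_alt values
instance (values : Option (List String)) (out : List String) : Decidable (Spec_expand_csv_query_values_py values out) := by unfold Spec_expand_csv_query_values_py; infer_instance

-- ===== CLAIM (what is proved, stated in full; the proofs are below) =====
def Claim_equal_expand_csv_query_values_py : Prop := ∀ (values : Option (List String)), Dom_expand_csv_query_values_py values → Spec_expand_csv_query_values_py values (expand_csv_query_values_py values)

-- ===== LEMMAS AND PROOFS =====

-- recursive reference form of splitting one string at commas (proof-side only)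
def pvPieces : List Char → List (List Char)
  | [] => [[]]
  | c :: cs => if c = ',' then [] :: pvPieces cs else (pvPieces cs).modifyHead (c :: ·)

theorem pvPieces_ne_nil (cs : List Char) : pvPieces cs ≠ [] := by
  induction cs with
  | nil => simp [pvPieces]
  | cons c cs ih =>
    by_cases h : c = ',' <;> simp [pvPieces, h]
    cases hp : pvPieces cs with
    | nil => exact absurd hp ih
    | cons p ps => simp

-- PySem's fuel splitter on [','] agrees with the recursive reference
theorem pv_go_eq_pieces (fuel : Nat) (l cur : List Char) (acc : List (List Char))
    (h : l.length < fuel) :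
    PySem.Chars.splitOn.go [','] fuel l cur acc
      = acc.reverse ++ (pvPieces l).modifyHead (cur.reverse ++ ·) := by
  induction fuel generalizing l cur acc with
  | zero => omega
  | succ n ih =>
    cases l with
    | nil => simp [PySem.Chars.splitOn.go, pvPieces]
    | cons c rest =>
      by_cases hc : c = ','
      · subst hc
        have hpre : List.isPrefixOf [','] (',' :: rest) = true := by
          simp [List.isPrefixOf]
        simp only [PySem.Chars.splitOn.go, hpre, if_pos, List.length_cons, List.drop_succ_cons,
          List.length_nil, List.drop_zero]
        rw [ih rest [] (List.reverse cur :: acc) (by simp at h; omega)]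
        simp [pvPieces]
        cases pvPieces rest <;> simp
      · have hpre : List.isPrefixOf [','] (c :: rest) = false := by
          simp [List.isPrefixOf]
          intro h'; exact absurd h'.symm hc
        simp only [PySem.Chars.splitOn.go, hpre]
        rw [ih rest (c :: cur) acc (by simp at h; omega)]
        simp only [pvPieces, hc, if_neg, ite_false]
        cases hp : pvPieces rest with
        | nil => exact absurd hp (pvPieces_ne_nil rest)
        | cons p ps => simp

theorem pv_splitOn_eq_pieces (cs : List Char) :
    PySem.Chars.splitOn cs [','] = pvPieces cs := by
  unfold PySem.Chars.splitOn
  rw [pv_go_eq_pieces (cs.length + 1) cs [] [] (Nat.lt_succ_self _)]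
  cases hp : pvPieces cs with
  | nil => exact absurd hp (pvPieces_ne_nil cs)
  | cons p ps => simp

-- stripping cur ++ pend under the machine invariants gives back cur
theorem pv_strip_cur_pend (cur pend : List Char)
    (hp : ∀ c ∈ pend, PySem.Chars.isspace c = true)
    (hh : ∀ c, cur.head? = some c → PySem.Chars.isspace c = false)
    (hl : ∀ c, cur.getLast? = some c → PySem.Chars.isspace c = false)
    (he : cur = [] → pend = []) :
    PySem.Chars.strip (cur ++ pend) = cur := by
  cases cur with
  | nil => simp [he rfl, PySem.Chars.strip, PySem.Chars.lstrip, PySem.Chars.rstrip]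
  | cons d cur' =>
    have hd : PySem.Chars.isspace d = false := hh d rfl
    unfold PySem.Chars.strip PySem.Chars.lstrip PySem.Chars.rstrip
    simp only [List.cons_append]
    rw [List.dropWhile_cons_of_neg (by simp [hd])]
    have hrev : (d :: (cur' ++ pend)).reverse = pend.reverse ++ (d :: cur').reverse := by
      simp
    rw [hrev, List.dropWhile_append]
    have hpnil : List.dropWhile PySem.Chars.isspace pend.reverse = [] := by
      rw [List.dropWhile_eq_nil_iff]
      intro x hx; exact hp x (by simpa using hx)
    simp only [hpnil, List.isEmpty_nil, if_pos]
    cases hcr : (d :: cur').reverse with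
    | nil => simp at hcr
    | cons e rest =>
      have he' : (d :: cur').getLast? = some e := by
        rw [List.getLast?_eq_head?_reverse, hcr]; rfl
      rw [List.dropWhile_cons_of_neg (by simp [hl e he'])]
      rw [← hcr, List.reverse_reverse]

theorem pv_strip_cons_space (c : Char) (p : List Char)
    (hc : PySem.Chars.isspace c = true) :
    PySem.Chars.strip (c :: p) = PySem.Chars.strip p := by
  unfold PySem.Chars.strip PySem.Chars.lstrip
  rw [List.dropWhile_cons_of_pos (by simp [hc])]

-- the stripped pieces a machine run starting from (cur, pend) will produce
def pvStripped (cur pend cs : List Char) : List (List Char) :=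
  match pvPieces cs with
  | [] => []
  | p :: ps => PySem.Chars.strip (cur ++ pend ++ p) :: ps.map PySem.Chars.strip

-- main machine invariant: one string's scan, from any legal state
theorem pv_machine_eq (cs : List Char) : ∀ (out : List String) (cur pend : List Char),
    (∀ c ∈ pend, PySem.Chars.isspace c = true) →
    (∀ c, cur.head? = some c → PySem.Chars.isspace c = false) →
    (∀ c, cur.getLast? = some c → PySem.Chars.isspace c = false) →
    (cur = [] → pend = []) →
    (let st := cs.foldl pvBStep (out, cur, pend)
     if st.2.1 ≠ [] then st.1 ++ [String.ofList st.2.1] else st.1)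
      = out ++ ((pvStripped cur pend cs).filter (· ≠ [])).map String.ofList := by
  induction cs with
  | nil =>
    intro out cur pend hp hh hl he
    simp only [List.foldl_nil, pvStripped, pvPieces]
    rw [List.append_nil, pv_strip_cur_pend cur pend hp hh hl he]
    by_cases hcur : cur = []
    · simp [hcur]
    · simp [hcur]
  | cons c rest ih =>
    intro out cur pend hp hh hl he
    by_cases hc : c = ','
    · subst hc
      simp only [List.foldl_cons, pvBStep, if_pos]
      rw [ih _ [] [] (by simp) (by simp) (by simp) (fun _ => rfl)]
      have hpieces : pvStripped cur pend (',' :: rest)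
          = PySem.Chars.strip (cur ++ pend) :: pvStripped [] [] rest := by
        simp only [pvStripped, pvPieces, if_pos]
        cases hr : pvPieces rest with
        | nil => exact absurd hr (pvPieces_ne_nil rest)
        | cons p ps => simp
      rw [hpieces, pv_strip_cur_pend cur pend hp hh hl he]
      by_cases hcur : cur = []
      · simp [hcur]
      · simp [hcur, List.filter_cons]
    · by_cases hs : PySem.Chars.isspace c = true
      · simp only [List.foldl_cons, pvBStep, hc, ite_false, if_neg, hs, if_pos]
        by_cases hcur : cur = []
        · subst hcur
          simp only [ne_eq, not_true_eq_false, ite_false, reduceIte]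
          rw [ih out [] pend hp (by simp) (by simp) (fun _ => he rfl)]
          have : pvStripped [] pend (c :: rest) = pvStripped [] pend rest := by
            simp only [pvStripped, pvPieces, hc, ite_false, if_neg]
            cases hr : pvPieces rest with
            | nil => exact absurd hr (pvPieces_ne_nil rest)
            | cons p ps =>
              simp only [List.modifyHead_cons]
              rw [he rfl]
              simp [pv_strip_cons_space c p hs]
          simp [this]
        · simp only [hcur, ne_eq, not_false_eq_true, ite_true, reduceIte]
          rw [ih out cur (pend ++ [c])
            (by intro x hx; rcases List.mem_append.mp hx with h1 | h1
                · exact hp x h1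
                · simp at h1; subst h1; exact hs)
            hh hl (fun h => absurd h hcur)]
          have : pvStripped cur (pend ++ [c]) rest = pvStripped cur pend (c :: rest) := by
            simp only [pvStripped, pvPieces, hc, ite_false, if_neg]
            cases hr : pvPieces rest with
            | nil => exact absurd hr (pvPieces_ne_nil rest)
            | cons p ps => simp
          simp [this]
      · -- ordinary token character
        simp only [List.foldl_cons, pvBStep, hc, ite_false, if_neg, hs, Bool.not_eq_true]
        rw [ih out (cur ++ pend ++ [c]) []
          (by simp)
          (by intro x hx
              cases cur with
              | nil =>
                rw [he rfl] at hx
                simp only [List.nil_append, List.head?_cons, Option.some.injEq] at hx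
                subst hx; exact eq_false_of_ne_true hs
              | cons d cur' =>
                simp only [List.cons_append, List.head?_cons, Option.some.injEq] at hx
                subst hx; exact hh d rfl)
          (by intro x hx
              rw [List.getLast?_concat] at hx
              simp only [Option.some.injEq] at hx
              subst hx; exact eq_false_of_ne_true hs)
          (by simp)]
        have : pvStripped (cur ++ pend ++ [c]) [] rest = pvStripped cur pend (c :: rest) := by
          simp only [pvStripped, pvPieces, hc, ite_false, if_neg]
          cases hr : pvPieces rest with
          | nil => exact absurd hr (pvPieces_ne_nil rest)
          | cons p ps => simp
        rw [this]

-- A's inner append loop is a filtered map (about A's own loop shape)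
theorem pv_inner_foldl (l : List String) (acc : List String) :
    l.foldl (fun expanded part =>
        let clean := PySem.Str.strip part
        if clean ≠ "" then expanded ++ [clean] else expanded) acc
      = acc ++ (l.map PySem.Str.strip).filter (fun c => c ≠ "") := by
  induction l generalizing acc with
  | nil => simp
  | cons x t ih =>
    simp only [List.foldl_cons, List.map_cons, ih]
    by_cases hx : PySem.Str.strip x ≠ ""
    · simp [hx]
    · simp [List.filter_cons]
      simp at hx
      simp [hx]

-- transporting strip/filter across String.ofList
theorem pv_lists_eq (P : List (List Char)) :
    List.map String.ofList (List.filter (fun x => x ≠ []) (List.map PySem.Chars.strip P))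
      = List.filter (fun c => c ≠ "") (List.map PySem.Str.strip (List.map String.ofList P)) := by
  induction P with
  | nil => rfl
  | cons p t ih =>
    have hstrip : PySem.Str.strip (String.ofList p) = String.ofList (PySem.Chars.strip p) := by
      simp [PySem.Str.strip]
    simp only [List.map_cons, List.filter_cons, hstrip]
    rw [apply_ite (List.map String.ofList), List.map_cons, ih]
    by_cases h : PySem.Chars.strip p = []
    · rw [if_neg (by simp [h]), if_neg (by rw [h]; decide)]
    · have h2 : String.ofList (PySem.Chars.strip p) ≠ "" := by
        intro hh
        exact h (by have := congrArg String.toList hh; simpa using this)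
      rw [if_pos (by simp [h]), if_pos (by simp [h2])]

-- both per-string bodies compute out ++ (stripped pieces ≠ []) as strings
theorem pv_per_string (v : String) (out : List String) :
    (let st := v.toList.foldl pvBStep (out, [], [])
     if st.2.1 ≠ [] then st.1 ++ [String.ofList st.2.1] else st.1)
      = ((PySem.Str.split? v ",").getD []).foldl (fun expanded part =>
          let clean := PySem.Str.strip part
          if clean ≠ "" then expanded ++ [clean] else expanded) out := by
  rw [pv_machine_eq v.toList out [] [] (by simp) (by simp) (by simp) (fun _ => rfl)]
  rw [pv_inner_foldl]
  have hsplit : PySem.Str.split? v ","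
      = some ((PySem.Chars.splitOn v.toList [',']).map String.ofList) := by
    simp [PySem.Str.split?, PySem.Chars.split?]
  rw [hsplit, Option.getD_some, pv_splitOn_eq_pieces]
  have hstr : pvStripped [] [] v.toList = (pvPieces v.toList).map PySem.Chars.strip := by
    unfold pvStripped
    cases hr : pvPieces v.toList with
    | nil => exact absurd hr (pvPieces_ne_nil v.toList)
    | cons p ps => simp
  rw [hstr]
  congr 1
  exact pv_lists_eq (pvPieces v.toList)

-- ===== VERDICT (by name: the statement is the Claim_ definition above) =====
theorem expand_csv_query_values_py_spec : Claim_equal_expand_csv_query_values_py := by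
  intro values _
  unfold Spec_expand_csv_query_values_py expand_csv_query_values_py expand_csv_query_values_py_alt
  cases values with
  | none => rfl
  | some vs =>
    by_cases hvs : vs = []
    · simp [hvs]
    · simp only [hvs, reduceIte, if_false]
      have hfold : ∀ (l : List String) (out : List String),
          l.foldl (fun out value =>
            let st := value.toList.foldl pvBStep (out, [], [])
            if st.2.1 ≠ [] then st.1 ++ [String.ofList st.2.1] else st.1) out
            = l.foldl (fun expanded value =>
                ((PySem.Str.split? value ",").getD []).foldl (fun expanded part =>
                  let clean := PySem.Str.strip part
                  if clean ≠ "" then expanded ++ [clean] else expanded) expanded) out := by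
        intro l
        induction l with
        | nil => intro out; rfl
        | cons v t ih =>
          intro out
          simp only [List.foldl_cons]
          rw [← pv_per_string, ih]
      exact (hfold vs []).symm
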